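-- pv_equiv track=rewrite | github.com/mangandajmz/ai-holding-company | scheduler/self_heal.py | _has_recent_heal_before_miss
-- ===== SOURCE A (Python) =====
-- from typing import Any
--
-- def _has_recent_heal_before_miss(entries: list[dict[str, Any]], job_id: str) -> bool:
--     """Return True if there is a 'healed' entry for job_id that precedes the
--     most recent 'missed' entry (i.e., job was healed once and then missed again).
--     """
--     saw_missed = False
--     for entry in reversed(entries):
--         if entry.get("job_id") != job_id:
--             continue
--         status = entry.get("status", "")
--         if not saw_missed:
--             if status == "missed":
--                 saw_missed = True
--         else:
--             if status == "healed":
--                 return True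
--             if status in ("fired", "late"):
--                 # Clean run since last heal — not a double miss
--                 return False
--     return False
-- ===== SOURCE B (Python) =====
-- def _has_recent_heal_before_miss(entries, job_id):
--     """Forward single pass: keep the most recent decisive status (healed/fired/late)
--     seen so far; each time a 'missed' entry appears, record whether the latest
--     decisive status at that moment was 'healed'. The value recorded at the last
--     'missed' is the answer (False if no 'missed' at all)."""
--     last_signal = None
--     answer = False
--     for e in entries:
--         if e.get("job_id") != job_id:
--             continue
--         s = e.get("status", "")
--         if s == "missed":
--             answer = (last_signal == "healed")
--         elif s in ("healed", "fired", "late"):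
--             last_signal = s
--     return answer
-- ===== Notes on version B (the rewrite author's own statement) =====
-- stated objective: alternative
-- what changed: A's early-returning reverse scan with a saw_missed flag is replaced by a forward single pass that maintains the most recent decisive status (healed/fired/late) and latches the answer at each 'missed' entry, returning the value latched at the last one.
import Mathlib
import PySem

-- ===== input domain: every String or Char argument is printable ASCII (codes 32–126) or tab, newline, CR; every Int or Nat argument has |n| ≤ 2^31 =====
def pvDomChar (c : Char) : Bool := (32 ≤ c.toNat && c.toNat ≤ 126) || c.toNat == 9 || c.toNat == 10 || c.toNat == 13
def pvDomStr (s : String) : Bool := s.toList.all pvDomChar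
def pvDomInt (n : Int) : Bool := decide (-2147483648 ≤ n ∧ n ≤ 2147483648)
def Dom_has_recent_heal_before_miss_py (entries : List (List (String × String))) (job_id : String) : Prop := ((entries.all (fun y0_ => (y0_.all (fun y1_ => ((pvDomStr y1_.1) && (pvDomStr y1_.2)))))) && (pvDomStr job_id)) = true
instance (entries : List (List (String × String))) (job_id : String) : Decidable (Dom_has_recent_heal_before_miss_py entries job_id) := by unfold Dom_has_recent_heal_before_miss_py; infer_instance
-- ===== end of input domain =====

-- B replaces A's early-returning reverse scan (saw_missed flag) by a forward single pass that
-- tracks the latest decisive status and latches the answer at each 'missed' entry. Same O(n) cost.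

-- dict.get: first-match lookup in the association list (shared primitive of both ports)
def pvDictGet? (d : List (String × String)) (k : String) : Option String :=
  match d with
  | [] => none
  | (k', v) :: rest => if k' == k then some v else pvDictGet? rest k

def pvDictGetD (d : List (String × String)) (k : String) (dflt : String) : String :=
  (pvDictGet? d k).getD dflt

-- ===== PORT A =====
-- A's loop over reversed(entries) with the saw_missed flag, step for step
def pvLoopA (l : List (List (String × String))) (sawMissed : Bool) (job_id : String) : Bool :=
  match l with
  | [] => false
  | entry :: rest =>
    if pvDictGet? entry "job_id" ≠ some job_id then pvLoopA rest sawMissed job_id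
    else
      let status := pvDictGetD entry "status" ""
      if !sawMissed then
        pvLoopA rest (if status == "missed" then true else sawMissed) job_id
      else
        if status == "healed" then true
        else if status == "fired" || status == "late" then false
        else pvLoopA rest sawMissed job_id

def has_recent_heal_before_miss_py (entries : List (List (String × String))) (job_id : String) : Bool :=
  pvLoopA entries.reverse false job_id

-- ===== PORT B =====
-- B's loop body: state = (last_signal, answer)
def pvStepB (job_id : String) (st : Option String × Bool) (e : List (String × String)) : Option String × Bool :=
  if pvDictGet? e "job_id" ≠ some job_id then st
  else
    let s := pvDictGetD e "status" ""
    if s == "missed" then (st.1, st.1 == some "healed")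
    else if s == "healed" || s == "fired" || s == "late" then (some s, st.2)
    else st

def has_recent_heal_before_miss_py_alt (entries : List (List (String × String))) (job_id : String) : Bool :=
  (entries.foldl (pvStepB job_id) (none, false)).2

-- ===== PRECONDITION & SPEC =====
def Spec_has_recent_heal_before_miss_py (entries : List (List (String × String))) (job_id : String) (out : Bool) : Prop := out = has_recent_heal_before_miss_py_alt entries job_id
instance (entries : List (List (String × String))) (job_id : String) (out : Bool) : Decidable (Spec_has_recent_heal_before_miss_py entries job_id out) := by unfold Spec_has_recent_heal_before_miss_py; infer_instance

-- ===== CLAIM =====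
def Claim_equal_has_recent_heal_before_miss_py : Prop := ∀ (entries : List (List (String × String))) (job_id : String), Dom_has_recent_heal_before_miss_py entries job_id → Spec_has_recent_heal_before_miss_py entries job_id (has_recent_heal_before_miss_py entries job_id)

-- ===== LEMMAS AND PROOFS =====

-- first decisive status (newest-first) of a list
def pvSig (l : List (List (String × String))) : Option String :=
  match l with
  | [] => none
  | e :: rest =>
    let s := pvDictGetD e "status" ""
    if s == "healed" || s == "fired" || s == "late" then some s else pvSig rest

theorem pv_missed_not_decisive (s : String) (h : (s == "missed") = true) :
    (s == "healed" || s == "fired" || s == "late") = false := by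
  rw [beq_iff_eq] at h; subst h; decide

theorem pvStepB_match (job_id : String) (e : List (String × String)) (st : Option String × Bool)
    (he : pvDictGet? e "job_id" = some job_id) :
    pvStepB job_id st e =
      (if pvDictGetD e "status" "" == "missed" then (st.1, st.1 == some "healed")
       else if pvDictGetD e "status" "" == "healed" || pvDictGetD e "status" "" == "fired" || pvDictGetD e "status" "" == "late"
         then (some (pvDictGetD e "status" ""), st.2)
       else st) := by
  simp [pvStepB, he]

-- A's loop ignores non-matching entries
theorem pvLoopA_filter (l : List (List (String × String))) (b : Bool) (job_id : String) :
    pvLoopA l b job_id = pvLoopA (l.filter (fun e => pvDictGet? e "job_id" == some job_id)) b job_id := by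
  induction l generalizing b with
  | nil => rfl
  | cons e rest ih =>
    by_cases h : pvDictGet? e "job_id" = some job_id
    · simp [pvLoopA, h, List.filter_cons]
      split_ifs <;> simp [ih]
    · simp [pvLoopA, h, List.filter_cons, ih]

-- B's fold ignores non-matching entries
theorem pvFoldB_filter (l : List (List (String × String))) (s0 : Option String × Bool) (job_id : String) :
    l.foldl (pvStepB job_id) s0 = (l.filter (fun e => pvDictGet? e "job_id" == some job_id)).foldl (pvStepB job_id) s0 := by
  induction l generalizing s0 with
  | nil => rfl
  | cons e rest ih =>
    by_cases h : pvDictGet? e "job_id" = some job_id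
    · have h' : (pvDictGet? e "job_id" == some job_id) = true := by simp [h]
      simp [List.filter_cons, h', ih]
    · have h' : (pvDictGet? e "job_id" == some job_id) = false := by simp [h]
      have hid : pvStepB job_id s0 e = s0 := by simp [pvStepB, h]
      simp [List.filter_cons, h', hid, ih]

-- the sig component of B's fold over t.reverse is the first decisive status of t (newest-first)
theorem pvFoldB_sig (t : List (List (String × String))) (s0 : Option String × Bool) (job_id : String)
    (ht : ∀ e ∈ t, pvDictGet? e "job_id" = some job_id) :
    (t.reverse.foldl (pvStepB job_id) s0).1 =
      (match pvSig t with | some s => some s | none => s0.1) := by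
  induction t generalizing s0 with
  | nil => rfl
  | cons e rest ih =>
    have he := ht e (List.mem_cons_self ..)
    have hr : ∀ e' ∈ rest, pvDictGet? e' "job_id" = some job_id :=
      fun e' h' => ht e' (List.mem_cons_of_mem _ h')
    have hfold := ih s0 hr
    rw [List.reverse_cons, List.foldl_append, List.foldl_cons, List.foldl_nil]
    generalize hG : List.foldl (pvStepB job_id) s0 rest.reverse = st at hfold ⊢
    rw [pvStepB_match job_id e st he]
    simp only [pvSig]
    by_cases hm : (pvDictGetD e "status" "" == "missed") = true
    · simp [hm, pv_missed_not_decisive _ hm, hfold]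
    · by_cases hd : (pvDictGetD e "status" "" == "healed" || pvDictGetD e "status" "" == "fired" || pvDictGetD e "status" "" == "late") = true
      · simp [eq_false_of_ne_true hm, hd]
      · simp [eq_false_of_ne_true hm, eq_false_of_ne_true hd, hfold]

-- A's phase with sawMissed = true decides by the first decisive status
theorem pvLoopA_true (t : List (List (String × String))) (job_id : String)
    (ht : ∀ e ∈ t, pvDictGet? e "job_id" = some job_id) :
    pvLoopA t true job_id = (pvSig t == some "healed") := by
  induction t with
  | nil => rfl
  | cons e rest ih =>
    have he := ht e (List.mem_cons_self ..)
    have hr : ∀ e' ∈ rest, pvDictGet? e' "job_id" = some job_id :=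
      fun e' h' => ht e' (List.mem_cons_of_mem _ h')
    simp only [pvLoopA, pvSig, he]
    by_cases h1 : (pvDictGetD e "status" "" == "healed") = true
    · have h1' : pvDictGetD e "status" "" = "healed" := by simpa using h1
      simp [h1']
    · by_cases h2 : (pvDictGetD e "status" "" == "fired" || pvDictGetD e "status" "" == "late") = true
      · simp [eq_false_of_ne_true h1, h2]
      · simp [eq_false_of_ne_true h1, eq_false_of_ne_true h2, ih hr]

-- main bridge: A's reverse scan equals the answer component of B's forward fold
theorem pvLoopA_eq_fold (r : List (List (String × String))) (job_id : String)
    (hr : ∀ e ∈ r, pvDictGet? e "job_id" = some job_id) :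
    pvLoopA r false job_id = (r.reverse.foldl (pvStepB job_id) (none, false)).2 := by
  induction r with
  | nil => rfl
  | cons e t ih =>
    have he := hr e (List.mem_cons_self ..)
    have ht : ∀ e' ∈ t, pvDictGet? e' "job_id" = some job_id :=
      fun e' h' => hr e' (List.mem_cons_of_mem _ h')
    have hfold := ih ht
    have hsig := pvFoldB_sig t ((none : Option String), false) job_id ht
    rw [List.reverse_cons, List.foldl_append, List.foldl_cons, List.foldl_nil]
    generalize hG : List.foldl (pvStepB job_id) ((none : Option String), false) t.reverse = st at hfold hsig ⊢
    rw [pvStepB_match job_id e st he]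
    simp only [pvLoopA, he]
    by_cases hm : (pvDictGetD e "status" "" == "missed") = true
    · simp [hm, pvLoopA_true t job_id ht]
      cases h : pvSig t <;> simp [h] at hsig <;> simp [hsig]
    · by_cases hd : (pvDictGetD e "status" "" == "healed" || pvDictGetD e "status" "" == "fired" || pvDictGetD e "status" "" == "late") = true
      · simp [eq_false_of_ne_true hm, hd, hfold]
      · simp [eq_false_of_ne_true hm, eq_false_of_ne_true hd, hfold]

-- ===== VERDICT =====
theorem has_recent_heal_before_miss_py_spec : Claim_equal_has_recent_heal_before_miss_py := by
  intro entries job_id _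
  unfold Spec_has_recent_heal_before_miss_py has_recent_heal_before_miss_py has_recent_heal_before_miss_py_alt
  rw [pvLoopA_filter, pvFoldB_filter, List.filter_reverse]
  have h := pvLoopA_eq_fold ((entries.filter (fun e => pvDictGet? e "job_id" == some job_id)).reverse) job_id
    (fun e he => by
      have := List.of_mem_filter (List.mem_reverse.mp he)
      simpa using this)
  simpa using h
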